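-- pv_equiv track=rewrite | github.com/skdreier/religion-politics | make_get_cooccurrence_words_script.py | make_plain_version_of_term
-- ===== SOURCE A (Python) =====
-- def make_plain_version_of_term(inner_keyword):
--     # this IS supposed to have single quotes around the string
--     plain = "'"
--     for letter in inner_keyword:
--         if letter == "'" or letter == '\\':
--             plain += '\\'
--         plain += letter
--     plain += "'"
--     return plain
-- ===== SOURCE B (Python) =====
-- def make_plain_version_of_term(inner_keyword):
--     # this IS supposed to have single quotes around the string
--     # escape backslashes first, then single quotes, then wrap in quotes
--     return "'" + inner_keyword.replace('\\', '\\\\').replace("'", "\\'") + "'"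
-- ===== Notes on version B (the rewrite author's own statement) =====
-- stated objective: idiomatic
-- what changed: Replaced the char-by-char accumulator loop with two str.replace passes (backslash first, then quote) and string concatenation for the wrapping quotes.
import Mathlib
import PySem

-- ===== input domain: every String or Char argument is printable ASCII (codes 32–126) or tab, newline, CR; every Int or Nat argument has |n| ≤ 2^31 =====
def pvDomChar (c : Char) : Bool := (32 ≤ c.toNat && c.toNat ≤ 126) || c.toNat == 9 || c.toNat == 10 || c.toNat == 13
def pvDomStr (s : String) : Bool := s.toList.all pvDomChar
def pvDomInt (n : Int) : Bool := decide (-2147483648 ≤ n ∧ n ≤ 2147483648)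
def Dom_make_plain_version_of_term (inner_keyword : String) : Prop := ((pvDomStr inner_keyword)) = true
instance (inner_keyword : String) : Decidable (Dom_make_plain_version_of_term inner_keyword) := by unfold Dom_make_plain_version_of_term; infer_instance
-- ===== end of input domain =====

-- B replaces A's char-by-char accumulator loop with two str.replace passes (backslash first,
-- then single quote) plus concatenation of the wrapping quotes; more idiomatic, and the timing
-- run measured it faster by a constant factor (C-level replace vs a per-char Python loop).


-- ===== PORT A =====
-- plain = "'"; for letter in s: if letter == "'" or letter == '\': plain += '\'; plain += letter; plain += "'"
def make_plain_version_of_term (inner_keyword : String) : String :=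
  let plain : List Char := ['\'']
  let plain := inner_keyword.toList.foldl
    (fun plain letter =>
      let plain := if letter == '\'' || letter == '\\' then plain ++ ['\\'] else plain
      plain ++ [letter]) plain
  String.ofList (plain ++ ['\''])

-- ===== PORT B =====
-- return "'" + inner_keyword.replace('\\','\\\\').replace("'","\\'") + "'"
def make_plain_version_of_term_alt (inner_keyword : String) : String :=
  "'" ++ PySem.Str.replace (PySem.Str.replace inner_keyword "\\" "\\\\") "'" "\\'" ++ "'"

-- ===== PRECONDITION & SPEC =====
def Spec_make_plain_version_of_term (inner_keyword : String) (out : String) : Prop := out = make_plain_version_of_term_alt inner_keyword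
instance (inner_keyword : String) (out : String) : Decidable (Spec_make_plain_version_of_term inner_keyword out) := by unfold Spec_make_plain_version_of_term; infer_instance

-- ===== CLAIM (what is proved, stated in full; the proofs are below) =====
def Claim_equal_make_plain_version_of_term : Prop := ∀ (inner_keyword : String), Dom_make_plain_version_of_term inner_keyword → Spec_make_plain_version_of_term inner_keyword (make_plain_version_of_term inner_keyword)

-- ===== LEMMAS AND PROOFS =====

-- replace with a single-character needle never backtracks: go consumes one char per fuel unit
theorem replace_go_single (c : Char) (new : List Char) :
    ∀ (l acc : List Char) (fuel : Nat), l.length ≤ fuel →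
      PySem.Chars.replace.go [c] new fuel l acc
        = acc.reverse ++ l.flatMap (fun x => if x = c then new else [x]) := by
  intro l
  induction l with
  | nil =>
      intro acc fuel _
      cases fuel <;> simp [PySem.Chars.replace.go]
  | cons x t ih =>
      intro acc fuel hf
      cases fuel with
      | zero => simp at hf
      | succ n =>
          simp only [List.length_cons, Nat.succ_le_succ_iff] at hf
          by_cases hx : x = c
          · subst hx
            simp [PySem.Chars.replace.go, List.isPrefixOf, ih _ n hf]
          · have hcx : c ≠ x := fun h => hx h.symm
            simp [PySem.Chars.replace.go, List.isPrefixOf, hx, hcx, ih _ n hf]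

theorem replace_single (s : List Char) (c : Char) (new : List Char) :
    PySem.Chars.replace s [c] new = s.flatMap (fun x => if x = c then new else [x]) := by
  simp [PySem.Chars.replace, replace_go_single c new s (acc := []) s.length le_rfl]

-- A's loop appends, per character, the escape (if any) and the character itself
theorem loopA (l : List Char) : ∀ acc : List Char,
    l.foldl (fun plain letter =>
      (if letter == '\'' || letter == '\\' then plain ++ ['\\'] else plain) ++ [letter]) acc
    = acc ++ l.flatMap (fun x => if x = '\'' ∨ x = '\\' then ['\\', x] else [x]) := by
  induction l with
  | nil => intro acc; simp
  | cons x t ih =>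
      intro acc
      rw [List.foldl_cons]
      have step : (if x == '\'' || x == '\\' then acc ++ ['\\'] else acc) ++ [x]
          = acc ++ (if x = '\'' ∨ x = '\\' then ['\\', x] else [x]) := by
        by_cases hx : x = '\'' ∨ x = '\\'
        · have hb : (x == '\'' || x == '\\') = true := by
            rcases hx with h | h <;> simp [h]
          simp [hb, hx]
        · have h1 : ¬ x = '\'' := fun h => hx (Or.inl h)
          have h2 : ¬ x = '\\' := fun h => hx (Or.inr h)
          simp [h1, h2]
      rw [step, ih, List.flatMap_cons, List.append_assoc]

-- the two replace passes compose to exactly A's per-character escaping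
theorem passes (l : List Char) :
    (l.flatMap (fun x => if x = '\\' then ['\\', '\\'] else [x])).flatMap
        (fun x => if x = '\'' then ['\\', '\''] else [x])
    = l.flatMap (fun x => if x = '\'' ∨ x = '\\' then ['\\', x] else [x]) := by
  induction l with
  | nil => simp
  | cons x t ih =>
      rw [List.flatMap_cons, List.flatMap_cons, List.flatMap_append, ih]
      congr 1
      by_cases h1 : x = '\\'
      · subst h1; simp
      · by_cases h2 : x = '\''
        · subst h2; simp
        · simp [h1, h2]

theorem make_plain_version_of_term_spec : Claim_equal_make_plain_version_of_term := by
  intro s _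
  unfold Spec_make_plain_version_of_term
  have hB : (make_plain_version_of_term_alt s).toList
      = ['\''] ++ s.toList.flatMap (fun x => if x = '\'' ∨ x = '\\' then ['\\', x] else [x]) ++ ['\''] := by
    show (("'" : String) ++ _ ++ ("'" : String)).toList = _
    rw [String.toList_append, String.toList_append, PySem.Str.toList_replace,
        PySem.Str.toList_replace]
    show ['\''] ++ PySem.Chars.replace (PySem.Chars.replace s.toList ['\\'] ['\\', '\\']) ['\''] ['\\', '\''] ++ ['\''] = _
    rw [replace_single, replace_single, passes]
  have hA : (make_plain_version_of_term s).toList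
      = ['\''] ++ s.toList.flatMap (fun x => if x = '\'' ∨ x = '\\' then ['\\', x] else [x]) ++ ['\''] := by
    show (String.ofList _).toList = _
    rw [String.toList_ofList, loopA s.toList ['\'']]
  exact String.ext (hA.trans hB.symm)
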